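-- pv_equiv track=rewrite | github.com/Natural-Goldfish/Algorithm | Programmers/# [1차] 프렌즈 4블록.py | check
-- ===== SOURCE A (Python) =====
-- def check(arr):
--     block_num, flag = 0, False
--     for y in range(len(arr)-1):
--         for x in range(len(arr[0])-1):
--             if arr[y][x][0] == 'b' : continue
--             i, r, d, rd = arr[y][x][0], arr[y][x+1][0], arr[y+1][x][0], arr[y+1][x+1][0]
--             if i==r and i==d and i==rd :
--                 block_num += 4 - len(list(filter(lambda x : x, [arr[y][x][1], arr[y][x+1][1], arr[y+1][x][1], arr[y+1][x+1][1]])))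
--                 arr[y][x], arr[y][x+1], arr[y+1][x], arr[y+1][x+1] = (i, True), (r, True), (d, True), (rd, True)
--                 flag = True
--     if not flag :
--         return block_num, False
--     else :
--         return block_num, True
-- ===== SOURCE B (Python) =====
-- def check(arr):
--     # Two-phase: collect the cells of every matched 2x2 window (chars never change),
--     # then count the collected cells that were not yet marked, and mark them all.
--     h = len(arr)
--     w = len(arr[0]) if arr else 0
--     cells = set()
--     for y in range(h - 1):
--         for x in range(w - 1):
--             c = arr[y][x][0]
--             if c != 'b' and c == arr[y][x + 1][0] == arr[y + 1][x][0] == arr[y + 1][x + 1][0]: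
--                 cells.update(((y, x), (y, x + 1), (y + 1, x), (y + 1, x + 1)))
--     block_num = sum(1 for (y, x) in cells if not arr[y][x][1])
--     for (y, x) in cells:
--         arr[y][x] = (arr[y][x][0], True)
--     return block_num, len(cells) > 0
-- ===== Notes on version B (the rewrite author's own statement) =====
-- stated objective: alternative
-- what changed: A interleaves counting and in-place marking inside the window scan (reading partially-mutated bools); B is two-phase: it first collects the cells of all matched 2x2 windows into a set (chars never change), then counts the collected cells not yet marked and marks them all at once.
-- outside the precondition, e.g. on check([[('b', False), ('b', False)], [('a', False)]]): A returns (0, False), B returns (0, False)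
import Mathlib
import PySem

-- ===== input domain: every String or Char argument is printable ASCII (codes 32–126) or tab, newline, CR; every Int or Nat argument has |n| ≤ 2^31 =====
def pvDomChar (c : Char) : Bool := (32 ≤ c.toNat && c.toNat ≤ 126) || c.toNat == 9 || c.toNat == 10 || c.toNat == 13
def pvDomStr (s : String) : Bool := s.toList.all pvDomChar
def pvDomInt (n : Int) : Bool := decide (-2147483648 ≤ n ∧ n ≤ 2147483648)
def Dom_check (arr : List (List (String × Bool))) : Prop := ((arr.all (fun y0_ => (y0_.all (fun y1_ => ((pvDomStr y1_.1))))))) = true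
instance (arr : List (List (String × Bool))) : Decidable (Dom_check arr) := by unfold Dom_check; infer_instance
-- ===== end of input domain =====

-- B is an alternative two-phase decomposition (collect matched cells in a set, then count and mark once);
-- A mutates arr in place and so does the Python B — the equivalence proved here is about the RETURN value only.

-- ===== PORT A =====
-- arr[y][x] read (indices here are always ≥ 0, in range under Pre_check)
def cellGet (a : List (List (String × Bool))) (y x : Int) : String × Bool :=
  PySem.List.pyGetD (PySem.List.pyGetD a y []) x ("", false)

-- arr[y][x] = v  (indices from pyRange are ≥ 0, so pySetD is exact here)
def cellSet (a : List (List (String × Bool))) (y x : Int) (v : String × Bool) :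
    List (List (String × Bool)) :=
  PySem.List.pySetD a y (PySem.List.pySetD (PySem.List.pyGetD a y []) x v)

-- body of A's inner loop: state = (arr, block_num, flag)
def bodyA (st : List (List (String × Bool)) × Int × Bool) (y x : Int) :
    List (List (String × Bool)) × Int × Bool :=
  let a := st.1
  if (cellGet a y x).1 == "b" then st
  else
    let i := (cellGet a y x).1
    let r := (cellGet a y (x+1)).1
    let d := (cellGet a (y+1) x).1
    let rd := (cellGet a (y+1) (x+1)).1
    if i == r && i == d && i == rd then
      let n := st.2.1 +
        (4 - ((List.filter (fun b => b)
          [(cellGet a y x).2, (cellGet a y (x+1)).2,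
           (cellGet a (y+1) x).2, (cellGet a (y+1) (x+1)).2]).length : Int))
      let a1 := cellSet a y x (i, true)
      let a2 := cellSet a1 y (x+1) (r, true)
      let a3 := cellSet a2 (y+1) x (d, true)
      let a4 := cellSet a3 (y+1) (x+1) (rd, true)
      (a4, n, true)
    else st

def check (arr : List (List (String × Bool))) : Int × Bool :=
  let st :=
    (PySem.List.pyRange 0 ((arr.length : Int) - 1) 1).foldl
      (fun st y =>
        -- len(arr[0]) is re-read from the (possibly mutated) arr each outer iteration
        (PySem.List.pyRange 0 (((PySem.List.pyGetD st.1 0 ([] : List (String × Bool))).length : Int) - 1) 1).foldl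
          (fun st x => bodyA st y x) st)
      (arr, (0 : Int), false)
  if st.2.2 = false then (st.2.1, false) else (st.2.1, true)

-- ===== PORT B =====
-- the chained comparison  c != 'b' and c == r == d == rd  (short-circuit order kept)
def matchesB (arr : List (List (String × Bool))) (y x : Int) : Bool :=
  let c := (cellGet arr y x).1
  let r := (cellGet arr y (x+1)).1
  let d := (cellGet arr (y+1) x).1
  let rd := (cellGet arr (y+1) (x+1)).1
  !(c == "b") && (c == r) && (r == d) && (d == rd)

def cellsB (arr : List (List (String × Bool))) (h w : Int) : PySem.Set (Int × Int) :=
  (PySem.List.pyRange 0 (h - 1) 1).foldl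
    (fun s y =>
      (PySem.List.pyRange 0 (w - 1) 1).foldl
        (fun s x =>
          if matchesB arr y x then
            PySem.Set.update s [(y, x), (y, x+1), (y+1, x), (y+1, x+1)]
          else s) s)
    PySem.Set.empty

-- the final in-place marking loop of Source B is omitted: it does not affect the return value
def check_alt (arr : List (List (String × Bool))) : Int × Bool :=
  let h : Int := arr.length
  let w : Int := if arr.isEmpty then 0 else ((PySem.List.pyGetD arr 0 ([] : List (String × Bool))).length : Int)
  let cells := cellsB arr h w
  let blockNum : Int := cells.countP (fun p => !(cellGet arr p.1 p.2).2)
  (blockNum, decide (0 < cells.length))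

-- ===== PRECONDITION & SPEC =====
-- Pre_ excludes ragged grids that still reach a 2x2 window: on those A raises IndexError except when
-- every window is short-circuited by the 'b'/mismatch tests, an accident of raggedness we do not model.
def Pre_check (arr : List (List (String × Bool))) : Prop :=
  (∀ r ∈ arr, r.length = (arr.headD []).length) ∨ arr.length ≤ 1 ∨ (arr.headD []).length ≤ 1
instance (arr : List (List (String × Bool))) : Decidable (Pre_check arr) := by
  unfold Pre_check; infer_instance

def pvWitness_check : (List (List (String × Bool))) :=
  [[("a", false), ("a", false)], [("a", true), ("a", false)]]

def Spec_check (arr : List (List (String × Bool))) (out : Int × Bool) : Prop := out = check_alt arr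
instance (arr : List (List (String × Bool))) (out : Int × Bool) : Decidable (Spec_check arr out) := by
  unfold Spec_check; infer_instance

-- ===== CLAIM (what is proved, stated in full; the proofs are below) =====
def Claim_equal_check : Prop :=
  ∀ (arr : List (List (String × Bool))), Dom_check arr → Pre_check arr → Spec_check arr (check arr)

-- ===== LEMMAS AND PROOFS =====

-- abbreviations used only by the proofs
def pvW (arr : List (List (String × Bool))) : Int :=
  ((PySem.List.pyGetD arr 0 ([] : List (String × Bool))).length : Int)

-- the loop invariant tying A's running state to B's set of collected cells
def pvInv (arr : List (List (String × Bool)))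
    (st : List (List (String × Bool)) × Int × Bool) (S : PySem.Set (Int × Int)) : Prop :=
  st.1.length = arr.length ∧
  (∀ i : Int, 0 ≤ i →
     (PySem.List.pyGetD st.1 i ([] : List (String × Bool))).length
       = (PySem.List.pyGetD arr i ([] : List (String × Bool))).length) ∧
  (∀ y x : Int, 0 ≤ y → 0 ≤ x → (cellGet st.1 y x).1 = (cellGet arr y x).1) ∧
  (∀ y x : Int, 0 ≤ y → 0 ≤ x →
     (cellGet st.1 y x).2 = ((cellGet arr y x).2 || S.contains (y, x))) ∧
  st.2.1 = (S.countP (fun p => !(cellGet arr p.1 p.2).2) : Int) ∧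
  st.2.2 = !S.isEmpty ∧
  (∀ p ∈ S, 0 ≤ p.1 ∧ p.1 < (arr.length : Int) ∧ 0 ≤ p.2 ∧ p.2 < pvW arr)

lemma length_cellSet (a : List (List (String × Bool))) (y x : Int) (v : String × Bool) :
    (cellSet a y x v).length = a.length := by
  unfold cellSet; exact PySem.List.length_pySetD a y _

lemma getD_set2 {α : Type} (a : List (List α)) (n m n' m' : Nat) (d : α)
    (hn : n < a.length) (hm : m < (a.getD n []).length) (v : α) :
    ((a.set n ((a.getD n []).set m v)).getD n' []).getD m' d
      = if n' = n ∧ m' = m then v else (a.getD n' []).getD m' d := by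
  by_cases h1 : n' = n
  · subst h1
    have : (a.set n' ((a.getD n' []).set m v)).getD n' [] = (a.getD n' []).set m v := by
      simp [List.getD, hn]
    rw [this]
    by_cases h2 : m' = m
    · subst h2
      have hm' : m' < (a[n']?.getD []).length := by simpa [List.getD] using hm
      simp [List.getD, hm']
    · simp [List.getD, Ne.symm h2, h2]
  · simp [List.getD, Ne.symm h1, h1]

lemma cellGet_cellSet (a : List (List (String × Bool))) {y x y' x' : Int} (v : String × Bool)
    (hy : 0 ≤ y) (hx : 0 ≤ x) (hy' : 0 ≤ y') (hx' : 0 ≤ x')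
    (hyr : y < (a.length : Int))
    (hxr : x < ((PySem.List.pyGetD a y ([] : List (String × Bool))).length : Int)) :
    cellGet (cellSet a y x v) y' x' = if y' = y ∧ x' = x then v else cellGet a y' x' := by
  rw [PySem.List.pyGetD_of_nonneg _ _ hy] at hxr
  unfold cellGet cellSet
  rw [PySem.List.pySetD_of_nonneg _ _ hy, PySem.List.pySetD_of_nonneg _ _ hx,
      PySem.List.pyGetD_of_nonneg _ _ hy', PySem.List.pyGetD_of_nonneg _ _ hy,
      PySem.List.pyGetD_of_nonneg _ _ hx', PySem.List.pyGetD_of_nonneg _ _ hy',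
      PySem.List.pyGetD_of_nonneg _ _ hx']
  rw [getD_set2 a y.toNat x.toNat y'.toNat x'.toNat _ (by omega) (by omega) v]
  have : (y'.toNat = y.toNat ∧ x'.toNat = x.toNat) ↔ (y' = y ∧ x' = x) := by omega
  simp [this]

lemma rowlen_cellSet (a : List (List (String × Bool))) (y x : Int) (v : String × Bool)
    (i : Int) (hi : 0 ≤ i) (hy : 0 ≤ y) :
    (PySem.List.pyGetD (cellSet a y x v) i ([] : List (String × Bool))).length
      = (PySem.List.pyGetD a i ([] : List (String × Bool))).length := by
  unfold cellSet
  rw [PySem.List.pySetD_of_nonneg _ _ hy, PySem.List.pyGetD_of_nonneg _ _ hi,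
      PySem.List.pyGetD_of_nonneg _ _ hi]
  by_cases hiy : y.toNat = i.toNat
  · rw [← hiy]
    by_cases hl : y.toNat < a.length
    · simp [List.getD, hl]
      rw [PySem.List.pyGetD_of_nonneg _ _ hy]
      simp [List.getD, List.getElem?_eq_getElem hl]
    · rw [List.set_eq_of_length_le (by omega)]
  · simp [List.getD, hiy]

lemma rowW_of_pre (arr : List (List (String × Bool)))
    (hPre : ∀ r ∈ arr, r.length = (arr.headD []).length) :
    ∀ i : Int, 0 ≤ i → i < (arr.length : Int) →
      ((PySem.List.pyGetD arr i ([] : List (String × Bool))).length : Int) = pvW arr := by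
  intro i h0 h1
  rw [PySem.List.pyGetD_of_nonneg _ _ h0]
  unfold pvW
  rw [PySem.List.pyGetD_of_nonneg _ _ le_rfl]
  have hlt : i.toNat < arr.length := by omega
  have hmem : arr.getD i.toNat [] ∈ arr := by
    rw [List.getD_eq_getElem?_getD, List.getElem?_eq_getElem hlt]
    exact List.getElem_mem hlt
  have := hPre _ hmem
  have hhead : arr.headD [] = arr.getD 0 [] := by
    cases arr <;> rfl
  rw [hhead] at this
  rw [this]
  simp [Int.toNat_zero]

lemma len4 (a : List (List (String × Bool))) (y x : Int)
    (v0 v1 v2 v3 : String × Bool) :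
    (cellSet (cellSet (cellSet (cellSet a y x v0) y (x+1) v1) (y+1) x v2) (y+1) (x+1) v3).length
      = a.length := by
  simp only [length_cellSet]

lemma rowlen4 (a : List (List (String × Bool))) (y x : Int) (hy0 : 0 ≤ y)
    (v0 v1 v2 v3 : String × Bool) (i : Int) (hi : 0 ≤ i) :
    (PySem.List.pyGetD
        (cellSet (cellSet (cellSet (cellSet a y x v0) y (x+1) v1) (y+1) x v2) (y+1) (x+1) v3)
        i ([] : List (String × Bool))).length
      = (PySem.List.pyGetD a i ([] : List (String × Bool))).length := by
  rw [rowlen_cellSet _ _ _ _ _ hi (by omega), rowlen_cellSet _ _ _ _ _ hi (by omega),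
      rowlen_cellSet _ _ _ _ _ hi hy0, rowlen_cellSet _ _ _ _ _ hi hy0]

lemma read4 (a : List (List (String × Bool))) {y x : Int} (hy0 : 0 ≤ y) (hx0 : 0 ≤ x)
    (W : Int) (hyr : y + 1 < (a.length : Int)) (hx1 : x + 1 < W)
    (hrW : ∀ i : Int, 0 ≤ i → i < (a.length : Int) →
      ((PySem.List.pyGetD a i ([] : List (String × Bool))).length : Int) = W)
    (v0 v1 v2 v3 : String × Bool) :
    ∀ y' x' : Int, 0 ≤ y' → 0 ≤ x' →
    cellGet (cellSet (cellSet (cellSet (cellSet a y x v0) y (x+1) v1) (y+1) x v2) (y+1) (x+1) v3) y' x'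
      = if y' = y+1 ∧ x' = x+1 then v3
        else if y' = y+1 ∧ x' = x then v2
        else if y' = y ∧ x' = x+1 then v1
        else if y' = y ∧ x' = x then v0
        else cellGet a y' x' := by
  intro y' x' h0 h1
  have hl0 : (cellSet a y x v0).length = a.length := length_cellSet _ _ _ _
  have hl1 : (cellSet (cellSet a y x v0) y (x+1) v1).length = a.length := by
    rw [length_cellSet, hl0]
  have hl2 : (cellSet (cellSet (cellSet a y x v0) y (x+1) v1) (y+1) x v2).length = a.length := by
    rw [length_cellSet, hl1]
  have hr0 : ∀ i : Int, 0 ≤ i →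
      (PySem.List.pyGetD (cellSet a y x v0) i ([] : List (String × Bool))).length
        = (PySem.List.pyGetD a i ([] : List (String × Bool))).length := fun i hi =>
    rowlen_cellSet _ _ _ _ _ hi hy0
  have hr1 : ∀ i : Int, 0 ≤ i →
      (PySem.List.pyGetD (cellSet (cellSet a y x v0) y (x+1) v1) i ([] : List (String × Bool))).length
        = (PySem.List.pyGetD a i ([] : List (String × Bool))).length := fun i hi => by
    rw [rowlen_cellSet _ _ _ _ _ hi hy0]; exact hr0 i hi
  have hr2 : ∀ i : Int, 0 ≤ i →
      (PySem.List.pyGetD (cellSet (cellSet (cellSet a y x v0) y (x+1) v1) (y+1) x v2) i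
          ([] : List (String × Bool))).length
        = (PySem.List.pyGetD a i ([] : List (String × Bool))).length := fun i hi => by
    rw [rowlen_cellSet _ _ _ _ _ hi (by omega)]; exact hr1 i hi
  rw [cellGet_cellSet _ _ (by omega) (by omega) h0 h1
        (by rw [hl2]; omega)
        (by rw [(by push_cast [hr2 (y+1) (by omega)] ; rfl :
            ((PySem.List.pyGetD (cellSet (cellSet (cellSet a y x v0) y (x+1) v1) (y+1) x v2) (y+1)
              ([] : List (String × Bool))).length : Int)
            = ((PySem.List.pyGetD a (y+1) ([] : List (String × Bool))).length : Int)),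
            hrW (y+1) (by omega) (by omega)]; omega)]
  rw [cellGet_cellSet _ _ (by omega) hx0 h0 h1
        (by rw [hl1]; omega)
        (by rw [(by push_cast [hr1 (y+1) (by omega)] ; rfl :
            ((PySem.List.pyGetD (cellSet (cellSet a y x v0) y (x+1) v1) (y+1)
              ([] : List (String × Bool))).length : Int)
            = ((PySem.List.pyGetD a (y+1) ([] : List (String × Bool))).length : Int)),
            hrW (y+1) (by omega) (by omega)]; omega)]
  rw [cellGet_cellSet _ _ hy0 (by omega) h0 h1
        (by rw [hl0]; omega)
        (by rw [(by push_cast [hr0 y hy0] ; rfl :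
            ((PySem.List.pyGetD (cellSet a y x v0) y ([] : List (String × Bool))).length : Int)
            = ((PySem.List.pyGetD a y ([] : List (String × Bool))).length : Int)),
            hrW y hy0 (by omega)]; omega)]
  rw [cellGet_cellSet _ _ hy0 hx0 h0 h1 (by omega)
        (by rw [hrW y hy0 (by omega)]; omega)]

lemma step_pres (arr : List (List (String × Bool)))
    (hPre : ∀ r ∈ arr, r.length = (arr.headD []).length)
    {y x : Int} (hy0 : 0 ≤ y) (hy : y + 1 < (arr.length : Int))
    (hx0 : 0 ≤ x) (hx : x + 1 < pvW arr)
    (st : List (List (String × Bool)) × Int × Bool) (S : PySem.Set (Int × Int))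
    (h : pvInv arr st S) :
    pvInv arr (bodyA st y x)
      (if matchesB arr y x then
         PySem.Set.update S [(y, x), (y, x+1), (y+1, x), (y+1, x+1)]
       else S) := by
  obtain ⟨hlen, hrow, hchar, hbool, hcount, hflag, hmem⟩ := h
  have rowW := rowW_of_pre arr hPre
  have hc0 := hchar y x hy0 hx0
  have hc1 := hchar y (x+1) hy0 (by omega)
  have hc2 := hchar (y+1) x (by omega) hx0
  have hc3 := hchar (y+1) (x+1) (by omega) (by omega)
  simp only [bodyA, matchesB]
  rw [hc0, hc1, hc2, hc3]
  have hcond : (((cellGet arr y x).1 == (cellGet arr y (x+1)).1 &&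
       (cellGet arr y x).1 == (cellGet arr (y+1) x).1) &&
       (cellGet arr y x).1 == (cellGet arr (y+1) (x+1)).1)
      = (((cellGet arr y x).1 == (cellGet arr y (x+1)).1 &&
          (cellGet arr y (x+1)).1 == (cellGet arr (y+1) x).1) &&
          (cellGet arr (y+1) x).1 == (cellGet arr (y+1) (x+1)).1) := by
    rw [Bool.eq_iff_iff]
    simp only [Bool.and_eq_true, beq_iff_eq]
    constructor
    · rintro ⟨⟨h1, h2⟩, h3⟩; exact ⟨⟨h1, by rw [← h1, ← h2]⟩, by rw [← h2, ← h3]⟩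
    · rintro ⟨⟨h1, h2⟩, h3⟩; exact ⟨⟨h1, by rw [h1, h2]⟩, by rw [h1, h2, h3]⟩
  split_ifs with hA1 hB1 hA2 hB2 hB3
  · -- A skipped ('b') but B matched: impossible
    exact absurd hB1 (by simp [hA1])
  · exact ⟨hlen, hrow, hchar, hbool, hcount, hflag, hmem⟩
  · -- both matched: the real case
    have hrW : ∀ i : Int, 0 ≤ i → i < ((st.1.length : Nat) : Int) →
        ((PySem.List.pyGetD st.1 i ([] : List (String × Bool))).length : Int) = pvW arr := by
      intro i h0 h1
      rw [hrow i h0]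
      exact rowW i h0 (by omega)
    have hy1 : y + 1 < (st.1.length : Int) := by rw [hlen]; omega
    have hread := read4 st.1 hy0 hx0 (pvW arr) hy1 hx hrW
      ((cellGet arr y x).1, true) ((cellGet arr y (x+1)).1, true)
      ((cellGet arr (y+1) x).1, true) ((cellGet arr (y+1) (x+1)).1, true)
    have hfourmem : ∀ q : Int × Int,
        (q = (y, x) ∨ q = (y, x+1) ∨ q = (y+1, x) ∨ q = (y+1, x+1)) →
        q ∈ S.update [(y, x), (y, x+1), (y+1, x), (y+1, x+1)] := by
      intro q hq
      rw [PySem.Set.mem_update]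
      right
      simpa using hq
    refine ⟨?_, ?_, ?_, ?_, ?_, ?_, ?_⟩
    · rw [len4]; exact hlen
    · intro i hi
      rw [rowlen4 _ _ _ hy0 _ _ _ _ i hi]
      exact hrow i hi
    · intro y' x' h0 h1
      rw [hread y' x' h0 h1]
      split_ifs with q1 q2 q3 q4
      · obtain ⟨e1, e2⟩ := q1; rw [e1, e2]
      · obtain ⟨e1, e2⟩ := q2; rw [e1, e2]
      · obtain ⟨e1, e2⟩ := q3; rw [e1, e2]
      · obtain ⟨e1, e2⟩ := q4; rw [e1, e2]
      · exact hchar y' x' h0 h1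
    · intro y' x' h0 h1
      rw [hread y' x' h0 h1]
      split_ifs with q1 q2 q3 q4
      · have := hfourmem (y', x') (by simp [Prod.ext_iff]; omega)
        rw [(PySem.Set.contains_iff _ _).mpr this]
        simp
      · have := hfourmem (y', x') (by simp [Prod.ext_iff]; omega)
        rw [(PySem.Set.contains_iff _ _).mpr this]
        simp
      · have := hfourmem (y', x') (by simp [Prod.ext_iff]; omega)
        rw [(PySem.Set.contains_iff _ _).mpr this]
        simp
      · have := hfourmem (y', x') (by simp [Prod.ext_iff]; omega)
        rw [(PySem.Set.contains_iff _ _).mpr this]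
        simp
      · have hcc : (S.update [(y, x), (y, x+1), (y+1, x), (y+1, x+1)]).contains (y', x')
            = S.contains (y', x') := by
          rw [Bool.eq_iff_iff, PySem.Set.contains_iff, PySem.Set.contains_iff,
              PySem.Set.mem_update]
          constructor
          · rintro (h | h)
            · exact h
            · exfalso; simp [Prod.ext_iff] at h; omega
          · exact Or.inl
        rw [hbool y' x' h0 h1, hcc]
    · have hnod : ([(y, x), (y, x+1), (y+1, x), (y+1, x+1)] : List (Int × Int)).Nodup := by
        simp [Prod.ext_iff]
      have key : ((List.countP (fun p => !(cellGet arr p.1 p.2).2)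
            (List.filter (fun q => !S.contains q)
              [(y, x), (y, x+1), (y+1, x), (y+1, x+1)]) : Nat) : Int)
          = 4 - ((List.filter (fun b => b)
              [((cellGet arr y x).2 || S.contains (y, x)),
               ((cellGet arr y (x+1)).2 || S.contains (y, x+1)),
               ((cellGet arr (y+1) x).2 || S.contains (y+1, x)),
               ((cellGet arr (y+1) (x+1)).2 || S.contains (y+1, x+1))]).length : Int) := by
        rw [List.countP_filter]
        simp only [List.filter_cons, List.filter_nil, List.countP_cons, List.countP_nil]
        generalize (cellGet arr y x).2 = o0
        generalize (cellGet arr y (x+1)).2 = o1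
        generalize (cellGet arr (y+1) x).2 = o2
        generalize (cellGet arr (y+1) (x+1)).2 = o3
        generalize S.contains (y, x) = m0
        generalize S.contains (y, x+1) = m1
        generalize S.contains (y+1, x) = m2
        generalize S.contains (y+1, x+1) = m3
        cases o0 <;> cases o1 <;> cases o2 <;> cases o3 <;>
          cases m0 <;> cases m1 <;> cases m2 <;> cases m3 <;> decide
      simp only []
      rw [hcount, PySem.Set.update_eq_append_filter, List.countP_append,
          PySem.Set.ofList_eq_self_of_nodup _ hnod]
      rw [hbool y x hy0 hx0, hbool y (x+1) hy0 (by omega),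
          hbool (y+1) x (by omega) hx0, hbool (y+1) (x+1) (by omega) (by omega)]
      push_cast
      rw [key]
    · have hne : S.update [(y, x), (y, x+1), (y+1, x), (y+1, x+1)] ≠ [] :=
        List.ne_nil_of_mem (hfourmem (y, x) (Or.inl rfl))
      have h5 : (S.update [(y, x), (y, x+1), (y+1, x), (y+1, x+1)]).isEmpty = false := by
        rw [List.isEmpty_eq_false_iff]
        exact hne
      simp only []
      rw [h5]
      rfl
    · intro p hp
      rw [PySem.Set.mem_update] at hp
      rcases hp with hp | hp
      · exact hmem p hp
      · simp only [List.mem_cons, List.not_mem_nil, or_false] at hp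
        rcases hp with rfl | rfl | rfl | rfl <;> refine ⟨by omega, by omega, by omega, by omega⟩
  · -- A matched, B not: impossible
    rw [Bool.not_eq_true] at hA1
    refine absurd ?_ hB2
    rw [hA1, Bool.not_false, Bool.true_and, ← hcond]
    exact hA2
  · -- B matched, A not: impossible
    rw [Bool.not_eq_true] at hA1
    rw [hA1, Bool.not_false, Bool.true_and, ← hcond] at hB3
    exact absurd hB3 hA2
  · exact ⟨hlen, hrow, hchar, hbool, hcount, hflag, hmem⟩


lemma inner_pres (arr : List (List (String × Bool)))
    (hPre : ∀ r ∈ arr, r.length = (arr.headD []).length)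
    {y : Int} (hy0 : 0 ≤ y) (hy : y + 1 < (arr.length : Int)) :
    ∀ (xs : List Int), (∀ x ∈ xs, 0 ≤ x ∧ x + 1 < pvW arr) →
    ∀ st S, pvInv arr st S →
    pvInv arr (xs.foldl (fun st x => bodyA st y x) st)
      (xs.foldl (fun s x =>
        if matchesB arr y x then
          PySem.Set.update s [(y, x), (y, x+1), (y+1, x), (y+1, x+1)]
        else s) S) := by
  intro xs
  induction xs with
  | nil => intro _ st S h; exact h
  | cons a l ih =>
    intro hb st S h
    simp only [List.foldl_cons]
    exact ih (fun x hx => hb x (List.mem_cons_of_mem _ hx)) _ _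
      (step_pres arr hPre hy0 hy (hb a List.mem_cons_self).1
        (hb a List.mem_cons_self).2 st S h)

lemma outer_pres (arr : List (List (String × Bool)))
    (hPre : ∀ r ∈ arr, r.length = (arr.headD []).length) :
    ∀ (ys : List Int), (∀ y' ∈ ys, 0 ≤ y' ∧ y' + 1 < (arr.length : Int)) →
    ∀ st S, pvInv arr st S →
    pvInv arr
      (ys.foldl (fun st y =>
        (PySem.List.pyRange 0 (((PySem.List.pyGetD st.1 0 ([] : List (String × Bool))).length : Int) - 1) 1).foldl
          (fun st x => bodyA st y x) st) st)
      (ys.foldl (fun s y =>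
        (PySem.List.pyRange 0 (pvW arr - 1) 1).foldl
          (fun s x =>
            if matchesB arr y x then
              PySem.Set.update s [(y, x), (y, x+1), (y+1, x), (y+1, x+1)]
            else s) s) S) := by
  intro ys
  induction ys with
  | nil => intro _ st S h; exact h
  | cons a l ih =>
    intro hb st S h
    simp only [List.foldl_cons]
    have hW : ((PySem.List.pyGetD st.1 0 ([] : List (String × Bool))).length : Int) = pvW arr := by
      rw [h.2.1 0 le_rfl]; rfl
    rw [hW]
    refine ih (fun y hy => hb y (List.mem_cons_of_mem _ hy)) _ _ ?_
    refine inner_pres arr hPre (hb a List.mem_cons_self).1 (hb a List.mem_cons_self).2 _ ?_ st S h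
    intro x hx
    rw [PySem.List.mem_pyRange_one] at hx
    exact ⟨hx.1, by omega⟩

lemma init_inv (arr : List (List (String × Bool))) :
    pvInv arr (arr, (0 : Int), false) PySem.Set.empty := by
  refine ⟨rfl, fun _ _ => rfl, fun _ _ _ _ => rfl, ?_, rfl, rfl, by intro p hp; cases hp⟩
  intro y' x' _ _
  simp [PySem.Set.contains_eq_listContains, PySem.Set.empty]

lemma noop_outer (arr : List (List (String × Bool))) (hW : pvW arr - 1 ≤ 0) :
    ∀ (ys : List Int),
    ys.foldl (fun st y =>
        (PySem.List.pyRange 0 (((PySem.List.pyGetD st.1 0 ([] : List (String × Bool))).length : Int) - 1) 1).foldl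
          (fun st x => bodyA st y x) st) (arr, (0 : Int), false)
      = (arr, (0 : Int), false) := by
  intro ys
  induction ys with
  | nil => rfl
  | cons a l ih =>
    have hnil : PySem.List.pyRange 0
        (((PySem.List.pyGetD arr 0 ([] : List (String × Bool))).length : Int) - 1) 1 = [] :=
      PySem.List.pyRange_one_eq_nil hW
    simp only [List.foldl_cons, hnil, List.foldl_nil]
    exact ih

-- ===== VERDICT (by name: the statement is the Claim_ definition above) =====
theorem check_spec : Claim_equal_check := by
  intro arr _hDom hPre
  unfold Spec_check
  simp only [check, check_alt, cellsB]
  by_cases hH : (arr.length : Int) - 1 ≤ 0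
  · -- fewer than two rows: both loops are empty
    simp [PySem.List.pyRange_one_eq_nil hH]
  · by_cases hW : pvW arr - 1 ≤ 0
    · -- rows too narrow: A's state never changes, B collects nothing
      rw [noop_outer arr hW]
      have hne : arr.isEmpty = false := by
        cases arr with
        | nil => simp at hH
        | cons r t => rfl
      have hnil : PySem.List.pyRange 0
          (((PySem.List.pyGetD arr 0 ([] : List (String × Bool))).length : Int) - 1) 1 = [] :=
        PySem.List.pyRange_one_eq_nil hW
      simp [hne, hnil]
    · -- the real case: at least a 2x2 grid, hence rectangular by Pre_check
      have hRect : ∀ r ∈ arr, r.length = (arr.headD []).length := by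
        rcases hPre with h | h | h
        · exact h
        · exfalso; omega
        · exfalso
          have hhead : arr.headD [] = arr.getD 0 [] := by cases arr <;> rfl
          have : pvW arr ≤ 1 := by
            unfold pvW
            rw [PySem.List.pyGetD_of_nonneg _ _ le_rfl]
            rw [hhead] at h
            simp only [Int.toNat_zero]
            omega
          omega
      have hinv := outer_pres arr hRect
        (PySem.List.pyRange 0 ((arr.length : Int) - 1) 1)
        (by intro y' hy'
            rw [PySem.List.mem_pyRange_one] at hy'
            exact ⟨hy'.1, by omega⟩)
        (arr, (0 : Int), false) PySem.Set.empty (init_inv arr)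
      have hne : arr.isEmpty = false := by
        cases arr with
        | nil => simp at hH
        | cons r t => rfl
      simp only [hne, Bool.false_eq_true, if_false]
      have epv : ((PySem.List.pyGetD arr 0 ([] : List (String × Bool))).length : Int) = pvW arr := rfl
      rw [epv]
      obtain ⟨-, -, -, -, hc, hf, -⟩ := hinv
      rw [hf, hc]
      cases hIs : List.isEmpty
          ((PySem.List.pyRange 0 ((arr.length : Int) - 1) 1).foldl (fun s y =>
            (PySem.List.pyRange 0 (pvW arr - 1) 1).foldl
              (fun s x =>
                if matchesB arr y x then
                  PySem.Set.update s [(y, x), (y, x+1), (y+1, x), (y+1, x+1)]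
                else s) s) PySem.Set.empty) with
      | false =>
        have hnil := List.isEmpty_eq_false_iff.mp hIs
        have hpos := List.length_pos_of_ne_nil hnil
        rw [if_neg (by decide)]
        simp only [Prod.mk.injEq]
        exact ⟨trivial, (decide_eq_true hpos).symm⟩
      | true =>
        have hnil := List.isEmpty_iff.mp hIs
        rw [if_pos (by decide)]
        rw [hnil]
        rfl
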